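-- pv_equiv track=rewrite | github.com/unknownahmad/harbour.space | lectures/01/exercises/problems.py | sum_until_negative
-- ===== SOURCE A (Python) =====
-- def sum_until_negative(numbers: list[int]) -> int:
--     a=0
--     for i in numbers:
--         if i <0:
--             break
--         a+=i
--     return a
--     """Return sum of numbers until the first negative value (exclusive)."""
--     raise NotImplementedError
-- ===== SOURCE B (Python) =====
-- def sum_until_negative(numbers: list[int]) -> int:
--     # Right-to-left pass: a negative element discards everything accumulated
--     # to its right, so after the full pass the total is the sum of the prefix
--     # before the leftmost negative.
--     total = 0
--     for v in reversed(numbers):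
--         total = 0 if v < 0 else v + total
--     return total
-- ===== Notes on version B (the rewrite author's own statement) =====
-- stated objective: alternative
-- what changed: B scans the list right-to-left, resetting the running total to 0 at every negative element (a fold from the right), instead of A's left-to-right accumulate-and-break loop; correct because the last reset seen is the leftmost negative.
import Mathlib
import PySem

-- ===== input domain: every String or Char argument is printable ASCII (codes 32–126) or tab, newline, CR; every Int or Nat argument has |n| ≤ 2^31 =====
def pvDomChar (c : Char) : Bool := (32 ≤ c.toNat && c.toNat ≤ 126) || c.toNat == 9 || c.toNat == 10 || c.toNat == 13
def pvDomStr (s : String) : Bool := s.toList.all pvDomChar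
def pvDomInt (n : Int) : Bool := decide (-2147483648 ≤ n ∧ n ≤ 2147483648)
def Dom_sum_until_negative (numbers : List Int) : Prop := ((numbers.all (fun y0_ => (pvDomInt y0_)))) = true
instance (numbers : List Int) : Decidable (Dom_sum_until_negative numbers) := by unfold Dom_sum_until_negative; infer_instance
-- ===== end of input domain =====

-- B folds from the right, resetting the total at each negative, instead of A's left-to-right accumulate-and-break loop.


-- ===== PORT A =====
-- A's loop with early break, as structural recursion carrying the accumulator a.
def sumUntilNegLoopA (a : Int) : List Int → Int
  | [] => a
  | i :: rest => if i < 0 then a else sumUntilNegLoopA (a + i) rest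

def sum_until_negative (numbers : List Int) : Int := sumUntilNegLoopA 0 numbers

-- ===== PORT B =====
-- B: for v in reversed(numbers): total = 0 if v < 0 else v + total
def sum_until_negative_alt (numbers : List Int) : Int :=
  numbers.reverse.foldl (fun total v => if v < 0 then 0 else v + total) 0

-- ===== PRECONDITION & SPEC =====
def Spec_sum_until_negative (numbers : List Int) (out : Int) : Prop := out = sum_until_negative_alt numbers
instance (numbers : List Int) (out : Int) : Decidable (Spec_sum_until_negative numbers out) := by unfold Spec_sum_until_negative; infer_instance

-- ===== CLAIM =====
def Claim_equal_sum_until_negative : Prop := ∀ (numbers : List Int), Dom_sum_until_negative numbers → Spec_sum_until_negative numbers (sum_until_negative numbers)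

-- ===== LEMMAS AND PROOFS =====
-- B's fold over the reversed list is the corresponding right fold.
lemma alt_eq_foldr (numbers : List Int) :
    sum_until_negative_alt numbers =
      numbers.foldr (fun v total => if v < 0 then 0 else v + total) 0 := by
  simp [sum_until_negative_alt, List.foldl_reverse]

lemma loopA_eq (xs : List Int) : ∀ a : Int,
    sumUntilNegLoopA a xs = a + xs.foldr (fun v total => if v < 0 then 0 else v + total) 0 := by
  induction xs with
  | nil => intro a; simp [sumUntilNegLoopA]
  | cons x xs ih =>
      intro a
      by_cases h : x < 0
      · simp [sumUntilNegLoopA, h]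
      · simp [sumUntilNegLoopA, h, ih, add_assoc]

-- ===== VERDICT =====
theorem sum_until_negative_spec : Claim_equal_sum_until_negative := by
  intro numbers _
  show sum_until_negative numbers = sum_until_negative_alt numbers
  rw [alt_eq_foldr]
  simpa using loopA_eq numbers 0
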